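-- pv_equiv track=rewrite | github.com/1r0nw1ll/quantum-arithmetic-research | qa_alphageometry_ptolemy/qa_norm_flip_signed_cert_v1/qa_norm_flip_signed_cert_validate.py | compute_flip_identity
-- ===== SOURCE A (Python) =====
-- def eisenstein_norm(b, e):
--     """f(b, e) = b*b + b*e - e*e. S1: b*b not b**2."""
--     return b * b + b * e - e * e
--
-- def compute_flip_identity(m):
--     checked = 0
--     matched = 0
--     for b in range(1, m + 1):
--         for e in range(1, m + 1):
--             checked += 1
--             if eisenstein_norm(e, b + e) == -eisenstein_norm(b, e):
--                 matched += 1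
--     return (checked, matched)
-- ===== SOURCE B (Python) =====
-- def compute_flip_identity(m):
--     # The Eisenstein-norm flip identity N(e, b+e) == -N(b, e) is an algebraic
--     # identity, so every pair matches: both counts equal the number of pairs.
--     n = m if m > 0 else 0
--     return (n * n, n * n)
-- ===== Notes on version B (the rewrite author's own statement) =====
-- stated objective: faster
-- what changed: B replaces the double loop by the closed form (n*n, n*n) with n = max(m,0), since the flip identity holds for every pair.
import Mathlib
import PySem

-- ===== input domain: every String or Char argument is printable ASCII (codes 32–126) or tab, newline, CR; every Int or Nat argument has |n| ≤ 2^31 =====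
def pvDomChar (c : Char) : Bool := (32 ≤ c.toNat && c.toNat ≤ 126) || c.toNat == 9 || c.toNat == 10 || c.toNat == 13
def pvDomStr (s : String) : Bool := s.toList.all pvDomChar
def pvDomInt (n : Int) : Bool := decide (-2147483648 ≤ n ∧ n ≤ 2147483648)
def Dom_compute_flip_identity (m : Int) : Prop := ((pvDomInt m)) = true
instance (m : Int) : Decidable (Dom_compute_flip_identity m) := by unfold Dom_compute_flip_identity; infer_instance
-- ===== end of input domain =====

-- B replaces A's double loop by the closed form (n*n, n*n), n = max(m,0): the flip identity holds for every pair.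

-- ===== PORT A =====
def eisenstein_norm (b e : Int) : Int := b * b + b * e - e * e

def compute_flip_identity (m : Int) : List Int :=
  let r := (PySem.List.pyRange 1 (m + 1) 1).foldl (fun (st : Int × Int) b =>
    (PySem.List.pyRange 1 (m + 1) 1).foldl (fun (st2 : Int × Int) e =>
      let checked := st2.1 + 1
      if eisenstein_norm e (b + e) = -eisenstein_norm b e then (checked, st2.2 + 1)
      else (checked, st2.2)) st) (0, 0)
  [r.1, r.2]

-- ===== PORT B =====
def compute_flip_identity_alt (m : Int) : List Int :=
  let n := if m > 0 then m else 0
  [n * n, n * n]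

-- ===== PRECONDITION & SPEC =====
def Spec_compute_flip_identity (m : Int) (out : List Int) : Prop := out = compute_flip_identity_alt m
instance (m : Int) (out : List Int) : Decidable (Spec_compute_flip_identity m out) := by unfold Spec_compute_flip_identity; infer_instance

-- ===== CLAIM (what is proved, stated in full; the proofs are below) =====
def Claim_equal_compute_flip_identity : Prop := ∀ (m : Int), Dom_compute_flip_identity m → Spec_compute_flip_identity m (compute_flip_identity m)

-- ===== LEMMAS AND PROOFS =====

-- the branch condition is an algebraic identity
theorem flip_identity_holds (b e : Int) : eisenstein_norm e (b + e) = -eisenstein_norm b e := by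
  unfold eisenstein_norm; ring

-- the inner loop adds the list length to both components
theorem body_eq (b : Int) (l : List Int) (st : Int × Int) :
    l.foldl (fun (st2 : Int × Int) e =>
      let checked := st2.1 + 1
      if eisenstein_norm e (b + e) = -eisenstein_norm b e then (checked, st2.2 + 1)
      else (checked, st2.2)) st = (st.1 + l.length, st.2 + l.length) := by
  induction l generalizing st with
  | nil => simp
  | cons x xs ih =>
      simp only [List.foldl_cons, if_pos (flip_identity_holds b x), ih]
      simp only [Prod.mk.injEq, List.length_cons]; push_cast; omega

theorem outer_foldl (lo : List Int) (li : List Int) (st : Int × Int) :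
    lo.foldl (fun (st : Int × Int) b =>
      li.foldl (fun (st2 : Int × Int) e =>
        let checked := st2.1 + 1
        if eisenstein_norm e (b + e) = -eisenstein_norm b e then (checked, st2.2 + 1)
        else (checked, st2.2)) st) st
      = (st.1 + lo.length * li.length, st.2 + lo.length * li.length) := by
  induction lo generalizing st with
  | nil => simp
  | cons x xs ih =>
      rw [List.foldl_cons, ih, body_eq]
      simp only [Prod.mk.injEq, List.length_cons]; push_cast
      constructor <;> ring

-- ===== VERDICT (by name: the statement is the Claim_ definition above) =====
theorem compute_flip_identity_spec : Claim_equal_compute_flip_identity := by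
  intro m _
  show compute_flip_identity m = compute_flip_identity_alt m
  unfold compute_flip_identity compute_flip_identity_alt
  simp only [outer_foldl, PySem.List.length_pyRange_one]
  have h : ((m + 1 - 1).toNat : Int) = if m > 0 then m else 0 := by omega
  simp only [h]; split <;> simp
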